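-- pv_equiv track=rewrite | github.com/arxanas/advent-of-code | year2021/day14/__init__.py | part1
-- ===== SOURCE A (Python) =====
-- from collections import Counter
-- from typing import Dict, List, Tuple
--
-- Input = Tuple[str, List[Tuple[str, str]]]
--
-- def rewrite_one(formula: str, rules: List[Tuple[str, str]]) -> str:
--     insertions = {}
--     for i, (a, b) in enumerate(zip(formula, formula[1:])):
--         for before, after in rules:
--             if a + b == before:
--                 insertions[i] = after
--     result = ""
--     for i, c in enumerate(formula):
--         result += c
--         if i in insertions:
--             result += insertions[i]
--     return result
--
-- def part1(input: Input) -> str: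
--     (formula, rules) = input
--     for i in range(10):
--         formula = rewrite_one(formula, rules)
--
--     elements = Counter(formula)
--     [(lc_v, least_common), *_, (mc_v, most_common)] = sorted(
--         (v, k) for (k, v) in elements.items()
--     )
--     return str(mc_v - lc_v)
-- ===== SOURCE B (Python) =====
-- def part1(input):
--     (formula, rules) = input
--     # last matching rule wins in A's insertions dict; only 2-char patterns can match
--     rule = {}
--     for before, after in rules:
--         if len(before) == 2:
--             rule[(before[0], before[1])] = after
--     pairs = {}
--     for a, b in zip(formula, formula[1:]):
--         pairs[(a, b)] = pairs.get((a, b), 0) + 1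
--     chars = {}
--     for c in formula:
--         chars[c] = chars.get(c, 0) + 1
--     for _ in range(10):
--         new_pairs = {}
--         for (a, b), n in pairs.items():
--             if (a, b) in rule:
--                 s = rule[(a, b)]
--                 chain = (a,) + tuple(s) + (b,)
--                 for x, y in zip(chain, chain[1:]):
--                     new_pairs[(x, y)] = new_pairs.get((x, y), 0) + n
--                 for c in s:
--                     chars[c] = chars.get(c, 0) + n
--             else:
--                 new_pairs[(a, b)] = new_pairs.get((a, b), 0) + n
--         pairs = new_pairs
--     items = sorted((v, k) for k, v in chars.items())
--     return str(items[-1][0] - items[0][0])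
-- ===== Notes on version B (the rewrite author's own statement) =====
-- stated objective: faster
-- what changed: Instead of materialising the exponentially growing polymer string for 10 rewrite rounds, B keeps a dict of adjacent-pair counts and a dict of element counts and updates both per round from a precomputed last-match rule dict, then takes min/max of the (count, element) pairs.
import Mathlib
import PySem

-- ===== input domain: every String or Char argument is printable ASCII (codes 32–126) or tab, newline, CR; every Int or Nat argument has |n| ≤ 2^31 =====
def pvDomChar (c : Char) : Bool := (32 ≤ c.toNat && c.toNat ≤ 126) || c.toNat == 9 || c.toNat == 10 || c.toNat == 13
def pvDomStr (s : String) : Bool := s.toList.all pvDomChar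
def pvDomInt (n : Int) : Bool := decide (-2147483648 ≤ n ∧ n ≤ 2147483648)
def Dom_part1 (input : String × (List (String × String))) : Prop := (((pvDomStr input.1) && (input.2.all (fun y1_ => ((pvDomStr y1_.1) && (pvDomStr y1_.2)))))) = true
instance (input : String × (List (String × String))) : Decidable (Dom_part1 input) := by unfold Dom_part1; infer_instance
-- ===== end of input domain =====

-- B replaces A's explicit 10-round string expansion by per-round updates of adjacent-pair
-- counts and element counts (objective: faster — the expansion is exponential in the rounds).

-- ===== PORT A =====
-- rewrite_one, on the char list of the formula
def pvRewriteOne (formula : List Char) (rules : List (String × String)) : List Char :=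
  -- insertions = {}; for i, (a, b) in enumerate(zip(formula, formula[1:])): for before, after in rules: if a + b == before: insertions[i] = after
  let pairsL := formula.zip (PySem.List.slice formula (some 1) none)
  let insertions : PySem.Dict Int String :=
    (PySem.List.enumerate pairsL).foldl
      (fun d iab =>
        rules.foldl (fun d r => if [iab.2.1, iab.2.2] = r.1.toList then d.insert iab.1 r.2 else d) d)
      (PySem.Dict.mk [])
  -- result = ""; for i, c in enumerate(formula): result += c; if i in insertions: result += insertions[i]
  (PySem.List.enumerate formula).foldl
    (fun acc ic =>
      let acc := acc ++ [ic.2]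
      match insertions.get? ic.1 with
      | some s => acc ++ s.toList
      | none => acc)
    []

def part1 (input : String × (List (String × String))) : String :=
  let formula := input.1
  let rules := input.2
  -- for i in range(10): formula = rewrite_one(formula, rules)
  let f10 := (PySem.List.pyRange 0 10 1).foldl (fun f _ => pvRewriteOne f rules) formula.toList
  -- elements = Counter(formula)
  let elements := PySem.Dict.counter f10
  -- sorted((v, k) for (k, v) in elements.items())
  let sortedPairs :=
    PySem.List.sorted2 (elements.items.map (fun kv => (kv.2, kv.1))) (fun p => p.1) (fun p => p.2)
  -- [(lc_v, least_common), *_, (mc_v, most_common)] = … ; raises ValueError on fewer than 2 items (excluded by Pre_)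
  match sortedPairs with
  | (lc_v, _) :: rest =>
    (match rest.getLast? with
     | some (mc_v, _) => PySem.Int.toStr (mc_v - lc_v)
     | none => "")
  | [] => ""

-- ===== PORT B =====
-- one round: rebuild the pair-count dict, extend the element-count dict
def pvStep (rule : PySem.Dict (Char × Char) String)
    (st : PySem.Dict (Char × Char) Int × PySem.Dict Char Int) :
    PySem.Dict (Char × Char) Int × PySem.Dict Char Int :=
  st.1.items.foldl
    (fun np qn =>
      match rule.get? qn.1 with
      | some s =>
        let chain : List Char := qn.1.1 :: (s.toList ++ [qn.1.2])
        ((chain.zip chain.tail).foldl (fun d xy => d.insert xy (d.getD xy 0 + qn.2)) np.1,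
         s.toList.foldl (fun d c => d.insert c (d.getD c 0 + qn.2)) np.2)
      | none => (np.1.insert qn.1 (np.1.getD qn.1 0 + qn.2), np.2))
    (PySem.Dict.mk [], st.2)

def part1_alt (input : String × (List (String × String))) : String :=
  let formula := input.1.toList
  let rules := input.2
  -- rule = {}; for before, after in rules: if len(before) == 2: rule[(before[0], before[1])] = after
  let rule : PySem.Dict (Char × Char) String :=
    rules.foldl
      (fun d r => match r.1.toList with
        | [x, y] => d.insert (x, y) r.2
        | _ => d)
      (PySem.Dict.mk [])
  -- pairs: counts of adjacent pairs of the formula; chars: counts of its elements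
  let pairs0 : PySem.Dict (Char × Char) Int :=
    (formula.zip formula.tail).foldl (fun d q => d.insert q (d.getD q 0 + 1)) (PySem.Dict.mk [])
  let chars0 : PySem.Dict Char Int :=
    formula.foldl (fun d c => d.insert c (d.getD c 0 + 1)) (PySem.Dict.mk [])
  -- for _ in range(10): one pvStep
  let st := (PySem.List.pyRange 0 10 1).foldl (fun st _ => pvStep rule st) (pairs0, chars0)
  -- items = sorted((v, k) for k, v in chars.items()); str(items[-1][0] - items[0][0])
  let items :=
    PySem.List.sorted2 (st.2.items.map (fun kv => (kv.2, kv.1))) (fun p => p.1) (fun p => p.2)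
  match PySem.List.pyGet? items (-1), PySem.List.pyGet? items 0 with
  | some last, some first => PySem.Int.toStr (last.1 - first.1)
  | _, _ => ""

-- ===== PRECONDITION & SPEC =====
-- Pre_ excludes exactly the inputs on which A raises ValueError: the expanded polymer has
-- fewer than two distinct elements, so the unpacking [(..), *_, (..)] of the sorted counts fails.
def Pre_part1 (input : String × (List (String × String))) : Prop :=
  2 ≤ (PySem.List.dedup input.1.toList).length ∨
  (2 ≤ input.1.toList.length ∧
    (match input.1.toList.head? with
     | some c =>
       (match (input.2.filter (fun r => decide ([c, c] = r.1.toList))).getLast? with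
        | some r => r.2.toList.any (fun d => d ≠ c)
        | none => false)
     | none => false) = true)
instance (input : String × (List (String × String))) : Decidable (Pre_part1 input) := by
  unfold Pre_part1; infer_instance

def pvWitness_part1 : (String × (List (String × String))) := ("AB", [("AB", "C")])

def Spec_part1 (input : String × (List (String × String))) (out : String) : Prop := out = part1_alt input
instance (input : String × (List (String × String))) (out : String) : Decidable (Spec_part1 input out) := by unfold Spec_part1; infer_instance

-- ===== CLAIM (what is proved, stated in full; the proofs are below) =====
def Claim_equal_part1 : Prop := ∀ (input : String × (List (String × String))), Dom_part1 input → Pre_part1 input → Spec_part1 input (part1 input)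

-- ===== LEMMAS AND PROOFS =====

-- the insertion chosen for the adjacent pair (a, b): the last rule whose pattern is "ab"
def pvLastIns (rules : List (String × String)) (a b : Char) : Option String :=
  ((rules.filter (fun r => decide ([a, b] = r.1.toList))).getLast?).map (fun r => r.2)

def pvIns (rules : List (String × String)) (a b : Char) : List Char :=
  (pvLastIns rules a b).elim [] String.toList

-- the chunk an adjacent pair (a, b) expands to (without the leading a it shares with its neighbour)
def pvChain (rules : List (String × String)) (q : Char × Char) : List Char :=
  q.1 :: (pvIns rules q.1 q.2 ++ [q.2])

-- the mathematical one-round rewrite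
def pvRw (rules : List (String × String)) : List Char → List Char
  | [] => []
  | [c] => [c]
  | a :: b :: t => a :: (pvIns rules a b ++ pvRw rules (b :: t))

def pvAdj (l : List Char) : List (Char × Char) := l.zip l.tail

-- lemma 1: the inner fold over rules keeps the last matching rule
theorem pv_inner_fold (rules : List (String × String)) (a b : Char) (i : Int)
    (d : PySem.Dict Int String) :
    rules.foldl (fun d r => if [a, b] = r.1.toList then d.insert i r.2 else d) d
      = match pvLastIns rules a b with
        | some v => d.insert i v
        | none => d := by
  induction rules using List.reverseRecOn generalizing d with
  | nil => simp [pvLastIns]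
  | append_singleton rs r ih =>
    rw [List.foldl_append, ih]
    unfold pvLastIns
    rw [List.filter_append, List.getLast?_append]
    by_cases h : [a, b] = r.1.toList
    · have hone : List.filter (fun r => decide ([a, b] = r.1.toList)) [r] = [r] := by simp [h]
      rw [hone]
      cases hl : (rs.filter (fun r => decide ([a, b] = r.1.toList))).getLast? with
      | none =>
        simp only [Option.map_none, List.foldl_cons, List.foldl_nil, if_pos h,
          List.getLast?_singleton, Option.some_or, Option.map_some]
      | some v =>
        simp only [Option.map_some, List.foldl_cons, List.foldl_nil, if_pos h,
          List.getLast?_singleton, Option.some_or]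
        rw [PySem.Dict.insert_insert_self]
    · have hnone : List.filter (fun r => decide ([a, b] = r.1.toList)) [r] = [] := by simp [h]
      rw [hnone]
      simp only [List.getLast?_nil, Option.or_none, List.foldl_cons, List.foldl_nil, if_neg h]
      rfl
-- lemma 2: lookups in the insertions dict built over enumerate
theorem pv_enum_fold_get (rules : List (String × String)) (ps : List (Char × Char)) :
    ∀ (s : Int) (d : PySem.Dict Int String) (j : Int),
    ((PySem.List.enumerate ps s).foldl
        (fun d iab =>
          rules.foldl (fun d r => if [iab.2.1, iab.2.2] = r.1.toList then d.insert iab.1 r.2 else d) d)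
        d).get? j
      = match (if s ≤ j then ps[(j - s).toNat]? else none) with
        | some ab => (match pvLastIns rules ab.1 ab.2 with
                      | some v => some v
                      | none => d.get? j)
        | none => d.get? j := by
  induction ps with
  | nil => intro s d j; by_cases h : s ≤ j <;> simp [PySem.List.enumerate, h]
  | cons ab ps ih =>
    intro s d j
    rw [PySem.List.enumerate_cons, List.foldl_cons, ih (s + 1)]
    rw [pv_inner_fold rules ab.1 ab.2 s d]
    by_cases hj : j = s
    · subst hj
      have h1 : ¬ (j + 1 ≤ j) := by omega
      have h2 : (j ≤ j) := le_refl j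
      simp only [if_neg h1, if_pos h2, sub_self, Int.toNat_zero, List.getElem?_cons_zero]
      cases hl : pvLastIns rules ab.1 ab.2 with
      | none => rfl
      | some v => simp [PySem.Dict.get?_insert_self]
    · have hne : (PySem.Dict.get? (match pvLastIns rules ab.1 ab.2 with
        | some v => d.insert s v
        | none => d) j) = d.get? j := by
        cases pvLastIns rules ab.1 ab.2 with
        | none => rfl
        | some v => exact PySem.Dict.get?_insert_of_ne _ _ hj
      by_cases hsj : s ≤ j
      · have h1 : s + 1 ≤ j := by omega
        have h2 : (j - s).toNat = (j - (s+1)).toNat + 1 := by omega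
        simp only [if_pos h1, if_pos hsj, h2, List.getElem?_cons_succ]
        cases hps : ps[(j - (s+1)).toNat]? with
        | none => simp only [hps]; exact hne
        | some ab' =>
          simp only [hps]
          cases hl' : pvLastIns rules ab'.1 ab'.2 with
          | none => simp only [hl']; exact hne
          | some v => simp only [hl']
      · have h1 : ¬ (s + 1 ≤ j) := by omega
        simp only [if_neg h1, if_neg hsj]
        exact hne
-- the insertion at index i, read off the pair list
def pvInsAt (rules : List (String × String)) (ps : List (Char × Char)) (i : Int) : List Char :=
  if 0 ≤ i then
    (match ps[i.toNat]? with
     | some ab => pvIns rules ab.1 ab.2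
     | none => [])
  else []

theorem pvInsAt_shift (rules : List (String × String)) (q : Char × Char)
    (ps : List (Char × Char)) (i : Int) (h : 0 ≤ i) :
    pvInsAt rules (q :: ps) (i + 1) = pvInsAt rules ps i := by
  unfold pvInsAt
  have h1 : (0:Int) ≤ i + 1 := by omega
  have h2 : (i + 1).toNat = i.toNat + 1 := by omega
  rw [if_pos h1, if_pos h, h2, List.getElem?_cons_succ]

theorem pv_enum_shift {α : Type} (xs : List α) : ∀ (s : Int),
    PySem.List.enumerate xs (s + 1) = (PySem.List.enumerate xs s).map (fun p => (p.1 + 1, p.2)) := by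
  induction xs with
  | nil => intro s; simp [PySem.List.enumerate_nil]
  | cons x t ih =>
    intro s
    rw [PySem.List.enumerate_cons, PySem.List.enumerate_cons, List.map_cons, ← ih (s + 1)]

theorem pv_flat_enum (rules : List (String × String)) (l : List Char) :
    (PySem.List.enumerate l 0).flatMap (fun ic => ic.2 :: pvInsAt rules (pvAdj l) ic.1)
      = pvRw rules l := by
  induction l using pvRw.induct with
  | case1 => rfl
  | case2 c => rfl
  | case3 a b t ih =>
    rw [PySem.List.enumerate_cons, List.flatMap_cons]
    have hadj : pvAdj (a :: b :: t) = (a, b) :: pvAdj (b :: t) := rfl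
    have h0 : pvInsAt rules (pvAdj (a :: b :: t)) 0 = pvIns rules a b := by
      rw [hadj]; simp [pvInsAt]
    have hshift : (PySem.List.enumerate (b :: t) (0 + 1)).flatMap
        (fun ic => ic.2 :: pvInsAt rules (pvAdj (a :: b :: t)) ic.1)
        = (PySem.List.enumerate (b :: t) 0).flatMap
            (fun ic => ic.2 :: pvInsAt rules (pvAdj (b :: t)) ic.1) := by
      rw [pv_enum_shift, List.flatMap_map]
      apply List.flatMap_congr
      intro p hp
      rw [PySem.List.mem_enumerate_iff] at hp
      rcases hp with ⟨k, hk, rfl⟩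
      simp only [hadj]
      rw [pvInsAt_shift rules (a, b) (pvAdj (b :: t)) _ (by omega)]
    rw [hshift, ih, h0]
    rfl

theorem pv_rewriteOne_eq (rules : List (String × String)) (l : List Char) :
    pvRewriteOne l rules = pvRw rules l := by
  unfold pvRewriteOne
  simp only []
  rw [PySem.List.slice_from_one]
  set ps := l.zip l.tail with hps
  set ins := ((PySem.List.enumerate ps).foldl
      (fun d iab =>
        List.foldl (fun d r => if [iab.2.1, iab.2.2] = r.1.toList then d.insert iab.1 r.2 else d) d
          rules)
      (PySem.Dict.mk [])) with hins
  have hget : ∀ i : Int, ins.get? i = (match (if 0 ≤ i then ps[i.toNat]? else none) with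
      | some ab => (match pvLastIns rules ab.1 ab.2 with
                    | some v => some v
                    | none => none)
      | none => (none : Option String)) := by
    intro i
    rw [hins, pv_enum_fold_get rules ps 0 (PySem.Dict.mk []) i]
    simp only [sub_zero]
    cases (if (0:Int) ≤ i then ps[i.toNat]? else none) with
    | none => rfl
    | some ab => cases pvLastIns rules ab.1 ab.2 <;> rfl
  have hbody : (fun (acc : List Char) (ic : Int × Char) =>
        let acc' := acc ++ [ic.2]
        match ins.get? ic.1 with
        | some s => acc' ++ s.toList
        | none => acc')
      = fun acc ic => acc ++ (ic.2 :: pvInsAt rules ps ic.1) := by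
    funext acc ic
    rw [hget ic.1]
    unfold pvInsAt
    by_cases h : (0:Int) ≤ ic.1
    · simp only [if_pos h]
      cases ps[ic.1.toNat]? with
      | none => rfl
      | some ab =>
        simp only [pvIns]
        generalize pvLastIns rules ab.1 ab.2 = o
        cases o
        · rfl
        · simp
    · simp only [if_neg h]
  rw [hbody, PySem.List.foldl_append_eq_flatMap]
  rw [List.nil_append]
  exact pv_flat_enum rules l

-- ---------- counting facts about the mathematical rewrite ----------

theorem pvAdj_cons₂ (a b : Char) (t : List Char) :
    pvAdj (a :: b :: t) = (a, b) :: pvAdj (b :: t) := rfl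

theorem pvAdj_append_cons (xs : List Char) (y : Char) (ys : List Char) :
    pvAdj (xs ++ y :: ys) = pvAdj (xs ++ [y]) ++ pvAdj (y :: ys) := by
  induction xs with
  | nil => cases ys <;> rfl
  | cons x xs ih =>
    cases xs with
    | nil => cases ys <;> rfl
    | cons x' xs' =>
      have h1 : (x :: x' :: xs') ++ y :: ys = x :: x' :: (xs' ++ y :: ys) := by simp
      have h2 : (x :: x' :: xs') ++ [y] = x :: x' :: (xs' ++ [y]) := by simp
      rw [h1, h2, pvAdj_cons₂, pvAdj_cons₂]
      have h3 : x' :: (xs' ++ y :: ys) = (x' :: xs') ++ y :: ys := by simp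
      have h4 : x' :: (xs' ++ [y]) = (x' :: xs') ++ [y] := by simp
      rw [h3, h4, ih]
      simp

theorem pvRw_cons_cons (rules : List (String × String)) (a b : Char) (t : List Char) :
    pvRw rules (a :: b :: t) = a :: (pvIns rules a b ++ pvRw rules (b :: t)) := rfl

theorem pvRw_head (rules : List (String × String)) (b : Char) (t : List Char) :
    ∃ u, pvRw rules (b :: t) = b :: u := by
  cases t with
  | nil => exact ⟨[], rfl⟩
  | cons c t' => exact ⟨_, pvRw_cons_cons rules b c t'⟩

-- L1: element counts after one rewrite
theorem pv_count_rw (rules : List (String × String)) (l : List Char) (c : Char) :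
    (pvRw rules l).count c
      = l.count c + ((pvAdj l).map (fun q => (pvIns rules q.1 q.2).count c)).sum := by
  induction l using pvRw.induct with
  | case1 => rfl
  | case2 _ => simp [pvRw, pvAdj]
  | case3 a b t ih =>
    rw [pvRw_cons_cons, pvAdj_cons₂, List.map_cons, List.sum_cons]
    rw [List.count_cons, List.count_cons, List.count_append, ih]
    ring

-- L2: adjacent-pair counts after one rewrite
theorem pv_adj_rw (rules : List (String × String)) (l : List Char) (p : Char × Char) :
    (pvAdj (pvRw rules l)).count p
      = ((pvAdj l).map (fun q => (pvAdj (pvChain rules q)).count p)).sum := by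
  induction l using pvRw.induct with
  | case1 => rfl
  | case2 _ => rfl
  | case3 a b t ih =>
    obtain ⟨u, hu⟩ := pvRw_head rules b t
    rw [pvRw_cons_cons, pvAdj_cons₂, List.map_cons, List.sum_cons, ← ih, hu]
    have : a :: (pvIns rules a b ++ b :: u) = (a :: pvIns rules a b) ++ b :: u := by simp
    rw [this, pvAdj_append_cons]
    rw [List.count_append]
    congr 1

-- membership is preserved by a rewrite
theorem pv_mem_rw (rules : List (String × String)) (l : List Char) (c : Char)
    (h : c ∈ l) : c ∈ pvRw rules l := by
  have h1 : 0 < l.count c := List.count_pos_iff.mpr h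
  have h2 := pv_count_rw rules l c
  exact List.count_pos_iff.mp (by omega)

-- ---------- B-side dictionary lemmas ----------

theorem pv_delta_sum {κ : Type} (keys : List κ) [DecidableEq κ] (f : κ → ℤ) (x : κ)
    (hnd : keys.Nodup) (hx : x ∈ keys) :
    (keys.map (fun q => if x = q then f q else 0)).sum = f x := by
  induction keys with
  | nil => cases hx
  | cons k ks ih =>
    rw [List.map_cons, List.sum_cons]
    rcases List.mem_cons.mp hx with rfl | hx'
    · have hz : ∀ q ∈ ks, (if x = q then f q else 0) = 0 := by
        intro q hq
        have : x ≠ q := fun h => (List.nodup_cons.mp hnd).1 (h ▸ hq)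
        simp [this]
      rw [if_pos rfl, List.sum_eq_zero (by simpa using hz)]
      ring
    · have hne : x ≠ k := fun h => (List.nodup_cons.mp hnd).1 (h ▸ hx')
      rw [if_neg hne, ih (List.nodup_cons.mp hnd).2 hx']
      ring

theorem pv_sumconv {κ : Type} [BEq κ] [LawfulBEq κ] [DecidableEq κ] (m : List κ) (keys : List κ) (f : κ → ℤ)
    (hnd : keys.Nodup) (hsub : ∀ x ∈ m, x ∈ keys) :
    (keys.map (fun q => (m.count q : ℤ) * f q)).sum = (m.map f).sum := by
  induction m with
  | nil => simp
  | cons x m ih =>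
    have hsub' : ∀ y ∈ m, y ∈ keys := fun y hy => hsub y (List.mem_cons_of_mem x hy)
    rw [List.map_cons, List.sum_cons, ← ih hsub']
    have hsplit : (fun q => (((x :: m).count q : ℤ)) * f q)
        = fun q => (if x = q then f q else 0) + (m.count q : ℤ) * f q := by
      funext q
      rw [List.count_cons]
      by_cases h : x = q <;> simp [h, Ne.symm] <;> push_cast <;> ring
    rw [hsplit, PySem.List.sum_map_add_int,
      pv_delta_sum keys f x hnd (hsub x List.mem_cons_self)]

theorem pv_foldl_insert_add {κ : Type} [BEq κ] [LawfulBEq κ] [DecidableEq κ]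
    (n : ℤ) (l : List κ) : ∀ (d : PySem.Dict κ ℤ) (p : κ),
    (l.foldl (fun d x => d.insert x (d.getD x 0 + n)) d).getD p 0
      = d.getD p 0 + n * l.count p := by
  induction l with
  | nil => intro d p; simp
  | cons x l ih =>
    intro d p
    rw [List.foldl_cons, ih, PySem.Dict.getD_insert, List.count_cons]
    by_cases h : p = x
    · subst h; simp; ring
    · simp [h]; exact Or.inl (Ne.symm h)

-- B's precomputed rule dict holds the last matching rule for each pair
theorem pv_ruleDict_get (rules : List (String × String)) (a b : Char) :
    ∀ d : PySem.Dict (Char × Char) String,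
    (rules.foldl (fun d r => match r.1.toList with
        | [x, y] => d.insert (x, y) r.2
        | _ => d) d).get? (a, b)
      = match pvLastIns rules a b with
        | some v => some v
        | none => d.get? (a, b) := by
  induction rules using List.reverseRecOn with
  | nil => intro d; simp [pvLastIns]
  | append_singleton rs r ih =>
    intro d
    rw [List.foldl_append, List.foldl_cons, List.foldl_nil]
    unfold pvLastIns
    rw [List.filter_append, List.getLast?_append]
    by_cases h : [a, b] = r.1.toList
    · have hone : List.filter (fun r => decide ([a, b] = r.1.toList)) [r] = [r] := by simp [h]
      rw [hone, List.getLast?_singleton, Option.some_or, Option.map_some]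
      have hr : r.1.toList = [a, b] := h.symm
      rw [hr]
      rw [PySem.Dict.get?_insert_self]
    · have hnone : List.filter (fun r => decide ([a, b] = r.1.toList)) [r] = [] := by simp [h]
      rw [hnone, List.getLast?_nil, Option.none_or]
      have hstep : ∀ d' : PySem.Dict (Char × Char) String,
          (match r.1.toList with
            | [x, y] => d'.insert (x, y) r.2
            | _ => d').get? (a, b) = d'.get? (a, b) := by
        intro d'
        cases hr : r.1.toList with
        | nil => rfl
        | cons x tl =>
          cases tl with
          | nil => rfl
          | cons y tl2 =>
            cases tl2 with
            | nil =>
              have hne : ((a, b) : Char × Char) ≠ (x, y) := by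
                intro he
                apply h
                rw [hr]
                cases he
                rfl
              exact PySem.Dict.get?_insert_of_ne _ _ hne
            | cons z tl3 => rfl
      rw [hstep]
      exact ih d

-- ---------- B's per-round fold ----------

def pvRuleDict (rules : List (String × String)) : PySem.Dict (Char × Char) String :=
  rules.foldl (fun d r => match r.1.toList with
    | [x, y] => d.insert (x, y) r.2
    | _ => d) (PySem.Dict.mk [])

theorem pv_ruleDict_eq_lastIns (rules : List (String × String)) (a b : Char) :
    (pvRuleDict rules).get? (a, b) = pvLastIns rules a b := by
  rw [pvRuleDict, pv_ruleDict_get]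
  cases pvLastIns rules a b <;> rfl

-- the two components of pvStep's fold are independent folds
def pvF1 (rules : List (String × String)) (np : PySem.Dict (Char × Char) ℤ)
    (qn : (Char × Char) × ℤ) : PySem.Dict (Char × Char) ℤ :=
  match (pvRuleDict rules).get? qn.1 with
  | some s =>
    let chain : List Char := qn.1.1 :: (s.toList ++ [qn.1.2])
    (chain.zip chain.tail).foldl (fun d xy => d.insert xy (d.getD xy 0 + qn.2)) np
  | none => np.insert qn.1 (np.getD qn.1 0 + qn.2)

def pvF2 (rules : List (String × String)) (ch : PySem.Dict Char ℤ)
    (qn : (Char × Char) × ℤ) : PySem.Dict Char ℤ :=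
  match (pvRuleDict rules).get? qn.1 with
  | some s => s.toList.foldl (fun d c => d.insert c (d.getD c 0 + qn.2)) ch
  | none => ch

theorem pv_step_split (rules : List (String × String))
    (st : PySem.Dict (Char × Char) ℤ × PySem.Dict Char ℤ) :
    pvStep (pvRuleDict rules) st
      = (st.1.items.foldl (pvF1 rules) (PySem.Dict.mk []),
         st.1.items.foldl (pvF2 rules) st.2) := by
  unfold pvStep
  have hbody : (fun (np : PySem.Dict (Char × Char) ℤ × PySem.Dict Char ℤ)
      (qn : (Char × Char) × ℤ) =>
      match (pvRuleDict rules).get? qn.1 with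
      | some s =>
        let chain : List Char := qn.1.1 :: (s.toList ++ [qn.1.2])
        ((chain.zip chain.tail).foldl (fun d xy => d.insert xy (d.getD xy 0 + qn.2)) np.1,
         s.toList.foldl (fun d c => d.insert c (d.getD c 0 + qn.2)) np.2)
      | none => (np.1.insert qn.1 (np.1.getD qn.1 0 + qn.2), np.2))
      = fun np qn => (pvF1 rules np.1 qn, pvF2 rules np.2 qn) := by
    funext np qn
    unfold pvF1 pvF2
    cases (pvRuleDict rules).get? qn.1 <;> rfl
  rw [hbody]
  rw [PySem.List.foldl_prod_mk]

-- the chain of a pair is its pvChain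
theorem pv_chain_eq (rules : List (String × String)) (a b : Char) (s : String)
    (h : (pvRuleDict rules).get? (a, b) = some s) :
    (a :: (s.toList ++ [b])) = pvChain rules (a, b) := by
  rw [pvChain]
  have : pvIns rules a b = s.toList := by
    rw [pvIns, ← pv_ruleDict_eq_lastIns, h]
    rfl
  rw [this]

theorem pv_fold1_getD (rules : List (String × String)) (items : List ((Char × Char) × ℤ)) :
    ∀ (np : PySem.Dict (Char × Char) ℤ) (p : Char × Char),
    (items.foldl (pvF1 rules) np).getD p 0
      = np.getD p 0
        + (items.map (fun qn => qn.2 * ((pvAdj (pvChain rules qn.1)).count p : ℤ))).sum := by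
  induction items with
  | nil => intro np p; simp
  | cons qn items ih =>
    intro np p
    rw [List.foldl_cons, ih, List.map_cons, List.sum_cons]
    have hstep : (pvF1 rules np qn).getD p 0
        = np.getD p 0 + qn.2 * ((pvAdj (pvChain rules qn.1)).count p : ℤ) := by
      unfold pvF1
      cases hx : (pvRuleDict rules).get? qn.1 with
      | some s =>
        simp only []
        rw [pv_foldl_insert_add]
        have hx' : (pvRuleDict rules).get? (qn.1.1, qn.1.2) = some s := by
          rw [Prod.mk.eta]; exact hx
        have hc := pv_chain_eq rules qn.1.1 qn.1.2 s hx'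
        rw [Prod.mk.eta] at hc
        rw [show ((qn.1.1 :: (s.toList ++ [qn.1.2])).zip (qn.1.1 :: (s.toList ++ [qn.1.2])).tail)
            = pvAdj (qn.1.1 :: (s.toList ++ [qn.1.2])) from rfl, hc]
      | none =>
        simp only []
        rw [PySem.Dict.getD_insert]
        have hch : pvChain rules qn.1 = [qn.1.1, qn.1.2] := by
          rw [pvChain, pvIns, ← pv_ruleDict_eq_lastIns]
          rw [Prod.mk.eta, hx]
          rfl
        rw [hch]
        have hadj : pvAdj [qn.1.1, qn.1.2] = [(qn.1.1, qn.1.2)] := rfl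
        rw [hadj, Prod.mk.eta]
        by_cases h : p = qn.1
        · subst h; simp
        · have : ¬ ((qn.1 : Char × Char) = p) := Ne.symm h
          simp [h, List.count_singleton, this]
    rw [hstep]
    ring

theorem pv_fold2_getD (rules : List (String × String)) (items : List ((Char × Char) × ℤ)) :
    ∀ (ch : PySem.Dict Char ℤ) (c : Char),
    (items.foldl (pvF2 rules) ch).getD c 0
      = ch.getD c 0
        + (items.map (fun qn => qn.2 * ((pvIns rules qn.1.1 qn.1.2).count c : ℤ))).sum := by
  induction items with
  | nil => intro ch c; simp
  | cons qn items ih =>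
    intro ch c
    rw [List.foldl_cons, ih, List.map_cons, List.sum_cons]
    have hstep : (pvF2 rules ch qn).getD c 0
        = ch.getD c 0 + qn.2 * ((pvIns rules qn.1.1 qn.1.2).count c : ℤ) := by
      unfold pvF2
      cases hx : (pvRuleDict rules).get? qn.1 with
      | some s =>
        simp only []
        rw [pv_foldl_insert_add]
        have : pvIns rules qn.1.1 qn.1.2 = s.toList := by
          rw [pvIns, ← pv_ruleDict_eq_lastIns, Prod.mk.eta, hx]
          rfl
        rw [this]
      | none =>
        simp only []
        have : pvIns rules qn.1.1 qn.1.2 = [] := by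
          rw [pvIns, ← pv_ruleDict_eq_lastIns, Prod.mk.eta, hx]
          rfl
        rw [this]
        simp
    rw [hstep]
    ring

-- keys stay nodup and only chain pairs / inserted chars become keys
theorem pv_fold1_nodup (rules : List (String × String)) (items : List ((Char × Char) × ℤ)) :
    ∀ np : PySem.Dict (Char × Char) ℤ, np.keys.Nodup
      → (items.foldl (pvF1 rules) np).keys.Nodup := by
  induction items with
  | nil => intro np h; exact h
  | cons qn items ih =>
    intro np h
    rw [List.foldl_cons]
    apply ih
    unfold pvF1
    cases (pvRuleDict rules).get? qn.1 with
    | some s => exact PySem.Dict.nodup_keys_foldl_insert _ _ _ h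
    | none => exact PySem.Dict.nodup_keys_insert _ _ _ h

theorem pv_fold2_nodup (rules : List (String × String)) (items : List ((Char × Char) × ℤ)) :
    ∀ ch : PySem.Dict Char ℤ, ch.keys.Nodup
      → (items.foldl (pvF2 rules) ch).keys.Nodup := by
  induction items with
  | nil => intro ch h; exact h
  | cons qn items ih =>
    intro ch h
    rw [List.foldl_cons]
    apply ih
    unfold pvF2
    cases (pvRuleDict rules).get? qn.1 with
    | some s => exact PySem.Dict.nodup_keys_foldl_insert _ _ _ h
    | none => exact h

theorem pv_fold1_keys (rules : List (String × String)) (items : List ((Char × Char) × ℤ)) :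
    ∀ (np : PySem.Dict (Char × Char) ℤ) (p : Char × Char),
    p ∈ (items.foldl (pvF1 rules) np).keys
      → p ∈ np.keys ∨ ∃ qn ∈ items, p ∈ pvAdj (pvChain rules qn.1) := by
  induction items with
  | nil => intro np p h; exact Or.inl h
  | cons qn items ih =>
    intro np p h
    rw [List.foldl_cons] at h
    rcases ih _ p h with h1 | ⟨qn', hq', hp'⟩
    · unfold pvF1 at h1
      cases hx : (pvRuleDict rules).get? qn.1 with
      | some s =>
        rw [hx] at h1
        simp only [] at h1
        rw [PySem.Dict.keys_foldl_insert] at h1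
        rcases (PySem.Set.mem_union _ _ _).mp h1 with h2 | h2
        · exact Or.inl h2
        · right
          refine ⟨qn, List.mem_cons_self, ?_⟩
          have hx' : (pvRuleDict rules).get? (qn.1.1, qn.1.2) = some s := by
            rw [Prod.mk.eta]; exact hx
          have hc := pv_chain_eq rules qn.1.1 qn.1.2 s hx'
          rw [Prod.mk.eta] at hc
          rw [← hc]
          exact h2
      | none =>
        rw [hx] at h1
        simp only [] at h1
        rcases (PySem.Dict.mem_keys_insert _ _ _ _).mp h1 with h2 | h2
        · right
          refine ⟨qn, List.mem_cons_self, ?_⟩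
          have hch : pvChain rules qn.1 = [qn.1.1, qn.1.2] := by
            rw [pvChain, pvIns, ← pv_ruleDict_eq_lastIns, Prod.mk.eta, hx]
            rfl
          rw [hch]
          subst h2
          exact List.mem_singleton.mpr (Prod.mk.eta).symm
        · exact Or.inl h2
    · exact Or.inr ⟨qn', List.mem_cons_of_mem qn hq', hp'⟩

theorem pv_fold2_keys (rules : List (String × String)) (items : List ((Char × Char) × ℤ)) :
    ∀ (ch : PySem.Dict Char ℤ) (c : Char),
    c ∈ (items.foldl (pvF2 rules) ch).keys
      → c ∈ ch.keys ∨ ∃ qn ∈ items, c ∈ pvIns rules qn.1.1 qn.1.2 := by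
  induction items with
  | nil => intro ch c h; exact Or.inl h
  | cons qn items ih =>
    intro ch c h
    rw [List.foldl_cons] at h
    rcases ih _ c h with h1 | ⟨qn', hq', hp'⟩
    · unfold pvF2 at h1
      cases hx : (pvRuleDict rules).get? qn.1 with
      | some s =>
        rw [hx] at h1
        simp only [] at h1
        rw [PySem.Dict.keys_foldl_insert] at h1
        rcases (PySem.Set.mem_union _ _ _).mp h1 with h2 | h2
        · exact Or.inl h2
        · right
          refine ⟨qn, List.mem_cons_self, ?_⟩
          have : pvIns rules qn.1.1 qn.1.2 = s.toList := by
            rw [pvIns, ← pv_ruleDict_eq_lastIns, Prod.mk.eta, hx]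
            rfl
          rw [this]
          exact h2
      | none =>
        rw [hx] at h1
        exact Or.inl h1
    · exact Or.inr ⟨qn', List.mem_cons_of_mem qn hq', hp'⟩

-- ---------- the simulation invariant ----------

def pvINV (rules : List (String × String))
    (st : PySem.Dict (Char × Char) ℤ × PySem.Dict Char ℤ) (l : List Char) : Prop :=
  (∀ q, st.1.getD q 0 = ((pvAdj l).count q : ℤ)) ∧
  (∀ c, st.2.getD c 0 = (l.count c : ℤ)) ∧
  st.1.keys.Nodup ∧ st.2.keys.Nodup ∧
  (∀ q ∈ st.1.keys, q ∈ pvAdj l) ∧ (∀ c ∈ st.2.keys, c ∈ l)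

theorem pv_mem_of_getD_ne {κ : Type} [BEq κ] [LawfulBEq κ] (d : PySem.Dict κ ℤ) (k : κ)
    (h : d.getD k 0 ≠ 0) : k ∈ d.keys := by
  by_cases hc : d.contains k
  · exact (PySem.Dict.contains_iff_mem_keys _ _).mp hc
  · exact absurd (PySem.Dict.getD_of_not_contains d 0 (by simpa using hc)) h

theorem pv_step_inv (rules : List (String × String)) (l : List Char)
    (st : PySem.Dict (Char × Char) ℤ × PySem.Dict Char ℤ) (h : pvINV rules st l) :
    pvINV rules (pvStep (pvRuleDict rules) st) (pvRw rules l) := by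
  obtain ⟨hP, hC, hPn, hCn, hPk, hCk⟩ := h
  have hitems : st.1.items = st.1.keys.map (fun k => (k, st.1.getD k 0)) :=
    PySem.Dict.items_eq_map_keys st.1 hPn 0
  have hsub : ∀ x ∈ pvAdj l, x ∈ st.1.keys := by
    intro x hx
    apply pv_mem_of_getD_ne st.1 x
    rw [hP x]
    have : 0 < (pvAdj l).count x := List.count_pos_iff.mpr hx
    omega
  rw [pv_step_split]
  refine ⟨?_, ?_, ?_, ?_, ?_, ?_⟩
  · -- pair counts
    intro q
    rw [pv_fold1_getD, hitems, List.map_map]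
    have hcong : (st.1.keys.map ((fun qn => qn.2 * ((pvAdj (pvChain rules qn.1)).count q : ℤ)) ∘
          (fun k => (k, st.1.getD k 0))))
        = st.1.keys.map (fun k => ((pvAdj l).count k : ℤ) * ((pvAdj (pvChain rules k)).count q : ℤ)) := by
      apply List.map_congr_left
      intro k hk
      simp only [Function.comp]
      rw [hP k]
    rw [hcong, pv_sumconv (pvAdj l) st.1.keys
      (fun k => ((pvAdj (pvChain rules k)).count q : ℤ)) hPn hsub]
    rw [pv_adj_rw rules l q]
    have hempty : ({ items := [] } : PySem.Dict (Char × Char) ℤ).getD q 0 = 0 := rfl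
    rw [hempty, zero_add]
    push_cast
    rw [List.map_map]
    rfl
  · -- element counts
    intro c
    rw [pv_fold2_getD, hitems, List.map_map]
    have hcong : (st.1.keys.map ((fun qn => qn.2 * ((pvIns rules qn.1.1 qn.1.2).count c : ℤ)) ∘
          (fun k => (k, st.1.getD k 0))))
        = st.1.keys.map (fun k => ((pvAdj l).count k : ℤ) * ((pvIns rules k.1 k.2).count c : ℤ)) := by
      apply List.map_congr_left
      intro k hk
      simp only [Function.comp]
      rw [hP k]
    rw [hcong, pv_sumconv (pvAdj l) st.1.keys
      (fun k => ((pvIns rules k.1 k.2).count c : ℤ)) hPn hsub]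
    rw [hC c, pv_count_rw rules l c]
    push_cast
    rw [List.map_map]
    rfl
  · exact pv_fold1_nodup rules _ _ (by simp [PySem.Dict.keys])
  · exact pv_fold2_nodup rules _ _ hCn
  · -- new pair keys occur adjacently in the rewritten string
    intro p hp
    rcases pv_fold1_keys rules _ _ p hp with h0 | ⟨qn, hqn, hmem⟩
    · simp [PySem.Dict.keys] at h0
    · have hq1 : qn.1 ∈ st.1.keys := by
        rw [hitems] at hqn
        rcases List.mem_map.mp hqn with ⟨k, hk, hke⟩
        cases hke
        exact hk
      have hql : qn.1 ∈ pvAdj l := hPk qn.1 hq1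
      apply List.count_pos_iff.mp
      rw [pv_adj_rw rules l p]
      have hterm : 0 < (pvAdj (pvChain rules qn.1)).count p := List.count_pos_iff.mpr hmem
      have hmm : (pvAdj (pvChain rules qn.1)).count p
          ∈ (pvAdj l).map (fun q => (pvAdj (pvChain rules q)).count p) :=
        List.mem_map.mpr ⟨qn.1, hql, rfl⟩
      have := List.le_sum_of_mem hmm
      omega
  · -- new element keys occur in the rewritten string
    intro c hc
    rcases pv_fold2_keys rules _ _ c hc with h0 | ⟨qn, hqn, hmem⟩
    · exact pv_mem_rw rules l c (hCk c h0)
    · have hq1 : qn.1 ∈ st.1.keys := by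
        rw [hitems] at hqn
        rcases List.mem_map.mp hqn with ⟨k, hk, hke⟩
        cases hke
        exact hk
      have hql : qn.1 ∈ pvAdj l := hPk qn.1 hq1
      apply List.count_pos_iff.mp
      rw [pv_count_rw rules l c]
      have hterm : 0 < (pvIns rules qn.1.1 qn.1.2).count c := List.count_pos_iff.mpr hmem
      have hmm : (pvIns rules qn.1.1 qn.1.2).count c
          ∈ (pvAdj l).map (fun q => (pvIns rules q.1 q.2).count c) :=
        List.mem_map.mpr ⟨qn.1, hql, rfl⟩
      have := List.le_sum_of_mem hmm
      omega

theorem pv_init_inv (rules : List (String × String)) (l : List Char) :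
    pvINV rules
      ((l.zip l.tail).foldl (fun d q => d.insert q (d.getD q 0 + 1)) (PySem.Dict.mk []),
       l.foldl (fun d c => d.insert c (d.getD c 0 + 1)) (PySem.Dict.mk [])) l := by
  refine ⟨?_, ?_, ?_, ?_, ?_, ?_⟩
  · intro q
    rw [PySem.Dict.getD_foldl_insert_add_one]
    have hempty : ({ items := [] } : PySem.Dict (Char × Char) ℤ).getD q 0 = 0 := rfl
    rw [hempty, zero_add]
    rfl
  · intro c
    rw [PySem.Dict.getD_foldl_insert_add_one]
    have hempty : ({ items := [] } : PySem.Dict Char ℤ).getD c 0 = 0 := rfl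
    rw [hempty, zero_add]
  · exact PySem.Dict.nodup_keys_foldl_insert _ _ _ (by simp [PySem.Dict.keys])
  · exact PySem.Dict.nodup_keys_foldl_insert _ _ _ (by simp [PySem.Dict.keys])
  · intro q hq
    rw [PySem.Dict.keys_foldl_insert] at hq
    rcases (PySem.Set.mem_union _ _ _).mp hq with h0 | h0
    · simp [PySem.Dict.keys] at h0
    · exact h0
  · intro c hc
    rw [PySem.Dict.keys_foldl_insert] at hc
    rcases (PySem.Set.mem_union _ _ _).mp hc with h0 | h0
    · simp [PySem.Dict.keys] at h0
    · exact h0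

theorem pv_iter_inv (rules : List (String × String)) (xs : List Int) :
    ∀ (st : PySem.Dict (Char × Char) ℤ × PySem.Dict Char ℤ) (l : List Char),
    pvINV rules st l →
    pvINV rules (xs.foldl (fun st _ => pvStep (pvRuleDict rules) st) st)
      (xs.foldl (fun f _ => pvRw rules f) l) := by
  induction xs with
  | nil => intro st l h; exact h
  | cons x xs ih =>
    intro st l h
    rw [List.foldl_cons, List.foldl_cons]
    exact ih _ _ (pv_step_inv rules l st h)

-- ---------- ordering of the (count, element) pairs ----------

def pvEnc (p : ℤ × Char) : ℤ := p.1 * 4294967296 + (p.2.toNat : ℤ)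

theorem pv_enc_inj : Function.Injective pvEnc := by
  intro a b h
  unfold pvEnc at h
  have ha : a.2.toNat < 4294967296 := a.2.val.toNat_lt_size
  have hb : b.2.toNat < 4294967296 := b.2.val.toNat_lt_size
  have h1 : a.1 = b.1 := by omega
  have h2 : a.2.toNat = b.2.toNat := by omega
  have h3 : a.2 = b.2 := Char.eq_of_val_eq (by
    have := UInt32.toNat_inj (a := a.2.val) (b := b.2.val)
    exact this.mp h2)
  exact Prod.ext h1 h3

theorem pv_char_lt (a b : Char) : a < b ↔ a.toNat < b.toNat := by
  rw [Char.lt_def, UInt32.lt_iff_toNat_lt]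
  rfl

theorem pv_sorted2_eq_sorted (xs : List (ℤ × Char)) :
    PySem.List.sorted2 xs (fun p => p.1) (fun p => p.2) false
      = PySem.List.sorted xs pvEnc false := by
  unfold PySem.List.sorted2 PySem.List.sorted
  simp only [if_neg (by decide : ¬ (false = true))]
  have hfun : (fun (a b : ℤ × Char) =>
      decide (a.1 < b.1) || (!decide (b.1 < a.1) && decide (a.2 < b.2)))
      = fun a b => decide (pvEnc a < pvEnc b) := by
    funext a b
    have ha : a.2.toNat < 4294967296 := a.2.val.toNat_lt_size
    have hb : b.2.toNat < 4294967296 := b.2.val.toNat_lt_size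
    have hc : (a.2 < b.2) ↔ a.2.toNat < b.2.toNat := pv_char_lt a.2 b.2
    by_cases h1 : a.1 < b.1
    · have : pvEnc a < pvEnc b := by unfold pvEnc; omega
      simp [h1, this]
    · by_cases h2 : b.1 < a.1
      · have : ¬ (pvEnc a < pvEnc b) := by unfold pvEnc; omega
        simp [h1, h2, this]
      · by_cases h3 : a.2 < b.2
        · have : pvEnc a < pvEnc b := by unfold pvEnc; rw [hc] at h3; omega
          simp [h1, h2, h3, this]
        · have : ¬ (pvEnc a < pvEnc b) := by unfold pvEnc; rw [hc] at h3; omega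
          simp [h1, h2, h3, this]
  rw [hfun]

theorem pv_sorted2_perm_eq (xs ys : List (ℤ × Char)) (h : xs.Perm ys) :
    PySem.List.sorted2 xs (fun p => p.1) (fun p => p.2) false
      = PySem.List.sorted2 ys (fun p => p.1) (fun p => p.2) false := by
  rw [pv_sorted2_eq_sorted, pv_sorted2_eq_sorted]
  exact PySem.List.sorted_eq_sorted_of_perm xs ys pvEnc pv_enc_inj h

-- ---------- extracting the answer from the sorted list ----------

theorem pv_extract (S : List (ℤ × Char)) (hlen : 2 ≤ S.length) :
    (match S with
     | (lc_v, _) :: rest =>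
       (match rest.getLast? with
        | some (mc_v, _) => PySem.Int.toStr (mc_v - lc_v)
        | none => "")
     | [] => "")
    = (match PySem.List.pyGet? S (-1), PySem.List.pyGet? S 0 with
       | some last, some first => PySem.Int.toStr (last.1 - first.1)
       | _, _ => "") := by
  match S, hlen with
  | p0 :: p1 :: rest, _ =>
    obtain ⟨lc, c0⟩ := p0
    have hne : (p1 :: rest) ≠ [] := by simp
    have hex : ∃ mc kc, (p1 :: rest).getLast? = some (mc, kc) :=
      ⟨((p1 :: rest).getLast hne).1, ((p1 :: rest).getLast hne).2, by
        rw [List.getLast?_eq_some_getLast hne]⟩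
    obtain ⟨mc, kc, hlast⟩ := hex
    have hg0 : PySem.List.pyGet? ((lc, c0) :: p1 :: rest) 0 = some (lc, c0) :=
      PySem.List.pyGet?_zero_cons (lc, c0) (p1 :: rest)
    have hg1 : PySem.List.pyGet? ((lc, c0) :: p1 :: rest) (-1) = some (mc, kc) := by
      rw [PySem.List.pyGet?_neg_one, List.getLast?_cons_cons, hlast]
    have hred : (match (((lc, c0)) :: p1 :: rest : List (ℤ × Char)) with
        | (lc_v, _) :: rest =>
          (match rest.getLast? with
           | some (mc_v, _) => PySem.Int.toStr (mc_v - lc_v)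
           | none => "")
        | [] => "")
        = (match (p1 :: rest).getLast? with
           | some (mc_v, _) => PySem.Int.toStr (mc_v - lc)
           | none => "") := rfl
    rw [hred, hlast, hg0, hg1]

-- ---------- the precondition yields two distinct elements after expansion ----------

theorem pv_mem_fold (rules : List (String × String)) (xs : List Int) :
    ∀ (l : List Char) (x : Char), x ∈ l → x ∈ xs.foldl (fun f _ => pvRw rules f) l := by
  induction xs with
  | nil => intro l x h; exact h
  | cons a xs ih =>
    intro l x h
    rw [List.foldl_cons]
    exact ih _ x (pv_mem_rw rules l x h)

theorem pv_two_distinct (m : List Char) (x y : Char) (hxy : x ≠ y) (hx : x ∈ m) (hy : y ∈ m) :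
    2 ≤ (PySem.List.dedup m).length := by
  have hx' : x ∈ PySem.List.dedup m := (PySem.List.mem_dedup _ _).mpr hx
  have hy' : y ∈ PySem.List.dedup m := (PySem.List.mem_dedup _ _).mpr hy
  cases hd : PySem.List.dedup m with
  | nil => rw [hd] at hx'; cases hx'
  | cons z t =>
    cases t with
    | nil =>
      rw [hd] at hx' hy'
      simp at hx' hy'
      exact absurd (hx'.trans hy'.symm) hxy
    | cons z2 t2 => simp
    
theorem pv_pre_f10 (rules : List (String × String)) (l : List Char)
    (hpre : 2 ≤ (PySem.List.dedup l).length ∨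
      (2 ≤ l.length ∧
        (match l.head? with
         | some c =>
           (match (rules.filter (fun r => decide ([c, c] = r.1.toList))).getLast? with
            | some r => r.2.toList.any (fun d => d ≠ c)
            | none => false)
         | none => false) = true)) :
    2 ≤ (PySem.List.dedup ((PySem.List.pyRange 0 10 1).foldl (fun f _ => pvRw rules f) l)).length := by
  have hrange : PySem.List.pyRange 0 10 1 = 0 :: PySem.List.pyRange 1 10 1 :=
    PySem.List.pyRange_one_cons (by norm_num)
  rcases hpre with h2 | ⟨hlen, hcond⟩
  · -- two distinct elements already present
    cases hd : PySem.List.dedup l with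
    | nil => rw [hd] at h2; simp at h2
    | cons z t =>
      cases t with
      | nil => rw [hd] at h2; simp at h2
      | cons z2 t2 =>
        have hnd : (PySem.List.dedup l).Nodup := PySem.List.nodup_dedup l
        rw [hd] at hnd
        have hne : z ≠ z2 := by
          intro he
          subst he
          simp [List.nodup_cons] at hnd
        have hz : z ∈ l := (PySem.List.mem_dedup _ _).mp (by rw [hd]; simp)
        have hz2 : z2 ∈ l := (PySem.List.mem_dedup _ _).mp (by rw [hd]; simp)
        exact pv_two_distinct _ z z2 hne
          (pv_mem_fold rules _ l z hz) (pv_mem_fold rules _ l z2 hz2)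
  · -- a uniform formula with an inserting rule for its pair
    by_cases h2 : 2 ≤ (PySem.List.dedup l).length
    · cases hd : PySem.List.dedup l with
      | nil => rw [hd] at h2; simp at h2
      | cons z t =>
        cases t with
        | nil => rw [hd] at h2; simp at h2
        | cons z2 t2 =>
          have hnd : (PySem.List.dedup l).Nodup := PySem.List.nodup_dedup l
          rw [hd] at hnd
          have hne : z ≠ z2 := by
            intro he; subst he; simp [List.nodup_cons] at hnd
          have hz : z ∈ l := (PySem.List.mem_dedup _ _).mp (by rw [hd]; simp)
          have hz2 : z2 ∈ l := (PySem.List.mem_dedup _ _).mp (by rw [hd]; simp)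
          exact pv_two_distinct _ z z2 hne
            (pv_mem_fold rules _ l z hz) (pv_mem_fold rules _ l z2 hz2)
    · -- all elements are equal to the head c
      cases hl : l with
      | nil => rw [hl] at hlen; simp at hlen
      | cons c t =>
        rw [hl] at hcond
        simp only [List.head?_cons] at hcond
        cases t with
        | nil => rw [hl] at hlen; simp at hlen
        | cons e t2 =>
          have hec : e = c := by
            by_contra hne
            apply h2
            refine pv_two_distinct l e c (hne) ?_ ?_ <;> rw [hl] <;> simp
          subst hec
          -- l = e :: e :: t2
          cases hr : (rules.filter (fun r => decide ([e, e] = r.1.toList))).getLast? with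
          | none => rw [hr] at hcond; simp at hcond
          | some r =>
            rw [hr] at hcond
            simp only [List.any_eq_true, decide_eq_true_eq] at hcond
            obtain ⟨d, hd1, hd2⟩ := hcond
            have hins : pvIns rules e e = r.2.toList := by
              rw [pvIns, pvLastIns, hr]
              rfl
            have hdrw : d ∈ pvRw rules (e :: e :: t2) := by
              rw [pvRw_cons_cons, hins]
              simp [hd1]
            have hcrw : e ∈ pvRw rules (e :: e :: t2) :=
              pv_mem_rw rules (e :: e :: t2) e (by simp)
            rw [hrange, List.foldl_cons]
            first
            | exact pv_two_distinct _ d e hd2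
                (pv_mem_fold rules _ _ d hdrw) (pv_mem_fold rules _ _ e hcrw)
            | · rw [hl]
                exact pv_two_distinct _ d e hd2
                  (pv_mem_fold rules _ _ d hdrw) (pv_mem_fold rules _ _ e hcrw)

-- ===== VERDICT (by name: the statement is the Claim_ definition above) =====
set_option maxHeartbeats 1000000 in
theorem part1_spec : Claim_equal_part1 := by
  intro input hdom hpre
  obtain ⟨s, rules⟩ := input
  unfold Spec_part1 part1 part1_alt
  simp only []
  have hA : (fun (f : List Char) (_ : Int) => pvRewriteOne f rules)
      = (fun f _ => pvRw rules f) := by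
    funext f x; exact pv_rewriteOne_eq rules f
  rw [hA]
  rw [show (rules.foldl (fun d r => match r.1.toList with
      | [x, y] => d.insert (x, y) r.2
      | _ => d) (PySem.Dict.mk [])) = pvRuleDict rules from rfl]
  have hinv := pv_iter_inv rules (PySem.List.pyRange 0 10 1) _ _ (pv_init_inv rules s.toList)
  set f10 := (PySem.List.pyRange 0 10 1).foldl (fun f _ => pvRw rules f) s.toList with hf10
  set stB := (PySem.List.pyRange 0 10 1).foldl (fun st _ => pvStep (pvRuleDict rules) st)
    ((s.toList.zip s.toList.tail).foldl (fun d q => d.insert q (d.getD q 0 + 1)) (PySem.Dict.mk []),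
     s.toList.foldl (fun d c => d.insert c (d.getD c 0 + 1)) (PySem.Dict.mk [])) with hstB
  obtain ⟨hPc, hCc, hPn2, hCn2, hPk2, hCk2⟩ := hinv
  -- B's element dict lists exactly the distinct elements of f10 with their counts
  have hitems : stB.2.items = stB.2.keys.map (fun k => (k, (f10.count k : ℤ))) := by
    rw [PySem.Dict.items_eq_map_keys stB.2 hCn2 0]
    apply List.map_congr_left
    intro k hk
    rw [hCc k]
  have hkeysperm : stB.2.keys.Perm (PySem.Set.ofList f10) := by
    apply (List.perm_ext_iff_of_nodup hCn2 (PySem.Set.nodup_ofList f10)).mpr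
    intro k
    constructor
    · intro hk
      exact (PySem.Set.mem_ofList _ _).mpr (hCk2 k hk)
    · intro hk
      apply pv_mem_of_getD_ne stB.2 k
      rw [hCc k]
      have : 0 < f10.count k := List.count_pos_iff.mpr ((PySem.Set.mem_ofList _ _).mp hk)
      omega
  have hLperm : (stB.2.items.map (fun kv => (kv.2, kv.1))).Perm
      ((PySem.Dict.counter f10).items.map (fun kv => (kv.2, kv.1))) := by
    rw [hitems, PySem.Dict.items_counter, List.map_map, List.map_map]
    exact hkeysperm.map _
  have hS : PySem.List.sorted2 (stB.2.items.map (fun kv => (kv.2, kv.1)))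
        (fun p => p.1) (fun p => p.2) false
      = PySem.List.sorted2 ((PySem.Dict.counter f10).items.map (fun kv => (kv.2, kv.1)))
        (fun p => p.1) (fun p => p.2) false :=
    pv_sorted2_perm_eq _ _ hLperm
  rw [hS]
  have hlen : 2 ≤ (PySem.List.sorted2
      ((PySem.Dict.counter f10).items.map (fun kv => (kv.2, kv.1)))
      (fun p => p.1) (fun p => p.2) false).length := by
    have hp := (PySem.List.sorted2_perm
      ((PySem.Dict.counter f10).items.map (fun kv => (kv.2, kv.1)))
      (fun p => p.1) (fun p => p.2) false).length_eq
    rw [hp, List.length_map, PySem.Dict.items_counter, List.length_map]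
    have hdd := pv_pre_f10 rules s.toList ?_
    · rw [PySem.List.dedup_eq_ofList] at hdd
      exact hdd
    · unfold Pre_part1 at hpre
      exact hpre
  exact pv_extract _ hlen
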